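-- pv_equiv track=rewrite | github.com/dimkray/dilang | strings.py | getCharPosition
-- ===== SOURCE A (Python) =====
-- def getCharPosition(code: str, strList: str, startPosition=0):
--     position = len(code)
--     for char in strList:
--         posChar = code.find(char, startPosition)
--         if posChar < position and posChar >= 0:
--             position = code.find(char, startPosition)
--     if position == len(code):
--         position = -1
--     return position
-- ===== SOURCE B (Python) =====
-- def getCharPosition(code: str, strList: str, startPosition=0):
--     n = len(code)
--     s = startPosition if startPosition >= 0 else n + startPosition
--     if s < 0:
--         s = 0
--     first = {}
--     for i in range(s, n):
--         c = code[i]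
--         if c not in first:
--             first[c] = i
--     best = -1
--     for ch in strList:
--         if ch in first:
--             p = first[ch]
--             if best == -1 or p < best:
--                 best = p
--     return best
-- ===== Notes on version B (the rewrite author's own statement) =====
-- stated objective: faster
-- what changed: A calls code.find(char, startPosition) once per character of strList (each a fresh scan of code); B makes one pass over code building a first-occurrence index dict, then answers each strList character by a dict lookup and takes the minimum (-1 if none found).
import Mathlib
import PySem

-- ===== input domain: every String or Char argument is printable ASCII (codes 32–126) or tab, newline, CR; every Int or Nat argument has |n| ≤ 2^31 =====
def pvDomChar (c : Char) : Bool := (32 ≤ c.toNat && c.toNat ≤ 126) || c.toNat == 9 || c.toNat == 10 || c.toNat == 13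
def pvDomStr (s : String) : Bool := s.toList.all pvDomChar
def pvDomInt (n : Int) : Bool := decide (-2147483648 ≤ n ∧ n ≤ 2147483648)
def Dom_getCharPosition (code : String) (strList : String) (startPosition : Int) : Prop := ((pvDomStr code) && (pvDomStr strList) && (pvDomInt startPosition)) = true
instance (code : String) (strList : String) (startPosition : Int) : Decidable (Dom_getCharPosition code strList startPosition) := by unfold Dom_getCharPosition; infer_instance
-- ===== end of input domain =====

-- B replaces A's per-character rescans of `code` (one str.find per character of strList) by a
-- single pass over `code` building a first-occurrence index, then one dict lookup per character
-- of strList (objective: faster).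

-- ===== PORT A =====
def getCharPosition (code : String) (strList : String) (startPosition : Int) : Int :=
  let position : Int := PySem.Str.len code
  let position := strList.toList.foldl (fun position char =>
      let posChar := PySem.Str.findFrom code (String.ofList [char]) startPosition none
      if posChar < position ∧ posChar ≥ 0 then
        PySem.Str.findFrom code (String.ofList [char]) startPosition none
      else position) position
  if position = PySem.Str.len code then -1 else position

-- ===== PORT B =====
def getCharPosition_alt (code : String) (strList : String) (startPosition : Int) : Int :=
  let n : Int := PySem.Str.len code
  let s : Int := if startPosition ≥ 0 then startPosition else n + startPosition
  let s : Int := if s < 0 then 0 else s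
  let first : PySem.Dict Char Int :=
    (PySem.List.pyRange s n).foldl (fun d i =>
      match PySem.List.pyGet? code.toList i with
      | some c => if d.contains c then d else d.insert c i
      | none => d) PySem.Dict.empty
  strList.toList.foldl (fun best ch =>
    match first.get? ch with
    | some p => if best = -1 ∨ p < best then p else best
    | none => best) (-1)

-- ===== PRECONDITION & SPEC =====
def Spec_getCharPosition (code : String) (strList : String) (startPosition : Int) (out : Int) : Prop := out = getCharPosition_alt code strList startPosition
instance (code : String) (strList : String) (startPosition : Int) (out : Int) : Decidable (Spec_getCharPosition code strList startPosition out) := by unfold Spec_getCharPosition; infer_instance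

-- ===== CLAIM (what is proved, stated in full; the proofs are below) =====
def Claim_equal_getCharPosition : Prop := ∀ (code : String) (strList : String) (startPosition : Int), Dom_getCharPosition code strList startPosition → Spec_getCharPosition code strList startPosition (getCharPosition code strList startPosition)

-- ===== LEMMAS AND PROOFS =====

/-- First index of `c` in a list, if any (proof-side characterisation). -/
def pvFirstIdx (c : Char) : List Char → Option Nat
  | [] => none
  | x :: xs => if x = c then some 0 else (pvFirstIdx c xs).map (· + 1)

theorem pvFirstIdx_eq_none_iff (c : Char) (m : List Char) :
    pvFirstIdx c m = none ↔ c ∉ m := by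
  induction m with
  | nil => simp [pvFirstIdx]
  | cons x xs ih =>
    by_cases h : x = c
    · subst h; simp [pvFirstIdx]
    · rw [pvFirstIdx, if_neg h, Option.map_eq_none_iff, ih]
      constructor
      · intro hnot hmem
        rcases List.mem_cons.mp hmem with rfl | hmem'
        · exact h rfl
        · exact hnot hmem'
      · intro hnot hmem; exact hnot (List.mem_cons_of_mem _ hmem)

theorem pvFirstIdx_eq_some_iff (c : Char) (m : List Char) (j : Nat) :
    pvFirstIdx c m = some j ↔ (m[j]? = some c ∧ ∀ i < j, m[i]? ≠ some c) := by
  induction m generalizing j with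
  | nil => simp [pvFirstIdx]
  | cons x xs ih =>
    by_cases h : x = c
    · subst h
      constructor
      · intro h'
        have h0 : pvFirstIdx x (x :: xs) = some 0 := by simp [pvFirstIdx]
        rw [h0] at h'
        cases Option.some.inj h'
        simp
      · rintro ⟨h1, h2⟩
        cases j with
        | zero => simp [pvFirstIdx]
        | succ j' => exact absurd (by simp : (x :: xs)[0]? = some x) (h2 0 (Nat.succ_pos _))
    · simp only [pvFirstIdx, if_neg h]
      cases j with
      | zero =>
        simp only [List.getElem?_cons_zero, Option.map_eq_some_iff]
        constructor
        · rintro ⟨a, _, h0⟩; omega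
        · rintro ⟨h1, _⟩; exact absurd (Option.some.inj h1) h
      | succ j' =>
        simp only [Option.map_eq_some_iff, List.getElem?_cons_succ]
        constructor
        · rintro ⟨a, ha, hj⟩
          have haj : a = j' := by omega
          subst haj
          obtain ⟨h1, h2⟩ := (ih a).mp ha
          refine ⟨h1, ?_⟩
          intro i hi
          cases i with
          | zero => simpa using h
          | succ i' => exact h2 i' (by omega)
        · rintro ⟨h1, h2⟩
          refine ⟨j', (ih j').mpr ⟨h1, fun i hi => h2 (i+1) (by omega)⟩, rfl⟩

theorem pvFirstIdx_lt_length {c : Char} {m : List Char} {j : Nat}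
    (h : pvFirstIdx c m = some j) : j < m.length := by
  obtain ⟨h1, _⟩ := (pvFirstIdx_eq_some_iff c m j).mp h
  exact (List.getElem?_eq_some_iff.mp h1).1

theorem pv_singleton_prefix_iff (c : Char) (xs : List Char) :
    [c] <+: xs ↔ xs.head? = some c := by
  cases xs with
  | nil => simp
  | cons x t =>
    constructor
    · rintro ⟨r, hr⟩; cases hr; rfl
    · intro h; cases Option.some.inj h; exact ⟨t, rfl⟩

theorem pv_singleton_infix_iff (c : Char) (xs : List Char) :
    [c] <:+: xs ↔ c ∈ xs := by
  constructor
  · intro h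
    obtain ⟨w, hw1, hw2⟩ := List.infix_iff_prefix_suffix.mp h
    exact hw2.subset (hw1.subset (by simp))
  · intro h
    obtain ⟨s, t, rfl⟩ := List.append_of_mem h
    exact ⟨s, t, by simp⟩

/-- `Chars.find` on a single-character needle is `pvFirstIdx`. -/
theorem pv_find_single (m : List Char) (c : Char) :
    PySem.Chars.find m [c] =
      match pvFirstIdx c m with
      | none => -1
      | some j => (j : Int) := by
  cases hfi : pvFirstIdx c m with
  | none =>
    exact (PySem.Chars.find_eq_neg_one_iff m [c]).mpr
      (fun hin => ((pvFirstIdx_eq_none_iff c m).mp hfi) ((pv_singleton_infix_iff c m).mp hin))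
  | some j =>
    obtain ⟨h1, h2⟩ := (pvFirstIdx_eq_some_iff c m j).mp hfi
    have hmem : c ∈ m := List.mem_of_getElem? h1
    have hnn : 0 ≤ PySem.Chars.find m [c] := by
      rcases lt_or_ge (PySem.Chars.find m [c]) 0 with hlt | hge
      · have hne : PySem.Chars.find m [c] = -1 := by
          have := PySem.Chars.neg_one_le_find m [c]; omega
        exact absurd ((PySem.Chars.find_eq_neg_one_iff m [c]).mp hne)
          (by simpa using (pv_singleton_infix_iff c m).mpr hmem)
      · exact hge
    obtain ⟨hp, hmin⟩ := PySem.Chars.find_spec hnn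
    set t := (PySem.Chars.find m [c]).toNat with ht
    have htj : t = j := by
      have hle1 : ¬ j < t := fun hlt =>
        (hmin j hlt) ((pv_singleton_prefix_iff c _).mpr (by rwa [List.head?_drop]))
      have hle2 : ¬ t < j := fun hlt =>
        (h2 t hlt) (by rw [← List.head?_drop]; exact (pv_singleton_prefix_iff c _).mp hp)
      omega
    simp only []
    omega

/-- Clamped start index, as Python's `str.find` slice-bound rule computes it. -/
def pvClamp (start : Int) (n : Nat) : Nat :=
  if start < 0 then (start + n).toNat else min start.toNat n

/-- `findFrom` on a single-char needle, any integer start, via `pvFirstIdx`. -/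
theorem pv_findFrom_single (l : List Char) (c : Char) (start : Int) :
    PySem.Chars.findFrom l [c] start none =
      match pvFirstIdx c (l.drop (pvClamp start l.length)) with
      | none => -1
      | some j => ((pvClamp start l.length + j : Nat) : Int) := by
  unfold PySem.Chars.findFrom
  show (if (l.length : Int) < (if start < 0 then (if start + l.length < 0 then 0 else start + l.length) else start) then -1
    else
      have r := PySem.Chars.find (List.drop (if start < 0 then (if start + l.length < 0 then 0 else start + l.length) else start).toNat (List.take (l.length : Int).toNat l)) [c];
      if r = -1 then -1 else (if start < 0 then (if start + l.length < 0 then 0 else start + l.length) else start) + r) = _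
  by_cases hbig : (l.length : Int) < start
  · have hst : ¬ start < 0 := by omega
    have hcl : pvClamp start l.length = l.length := by
      unfold pvClamp; rw [if_neg hst]; omega
    rw [if_neg hst, if_pos hbig, hcl, List.drop_length]
    simp [pvFirstIdx]
  · have hcl : (if start < 0 then (if start + (l.length:Int) < 0 then 0 else start + l.length) else start) = ((pvClamp start l.length : Nat) : Int) := by
      unfold pvClamp; split <;> (try split) <;> omega
    rw [hcl]
    have hk : pvClamp start l.length ≤ l.length := by
      unfold pvClamp; split
      · omega
      · exact Nat.min_le_right _ _
    rw [if_neg (not_lt.mpr (by exact_mod_cast hk))]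
    simp only [Int.toNat_natCast, List.take_length, pv_find_single]
    cases hfi : pvFirstIdx c (l.drop (pvClamp start l.length)) with
    | none => simp
    | some j =>
      simp only [Int.reduceNeg]
      rw [if_neg (by omega : ¬ ((j:Nat):Int) = -1)]
      push_cast; ring

/-- The first-occurrence dict built by B's loop, characterised by `pvFirstIdx`. -/
theorem pv_build_get (l : List Char) (c : Char) :
    ∀ (m k : Nat) (d : PySem.Dict Char Int), l.length - k ≤ m →
    ((PySem.List.pyRange (k : Int) (l.length : Int)).foldl
      (fun d i => match PySem.List.pyGet? l i with
        | some ch => if d.contains ch then d else d.insert ch i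
        | none => d) d).get? c
    = if d.contains c then d.get? c
      else (pvFirstIdx c (l.drop k)).map (fun j => ((k + j : Nat) : Int)) := by
  intro m
  induction m with
  | zero =>
    intro k d hm
    have hk : l.length ≤ k := by omega
    rw [PySem.List.pyRange_one_eq_nil (by exact_mod_cast hk), List.foldl_nil,
        List.drop_of_length_le hk]
    by_cases hc : d.contains c
    · rw [if_pos hc]
    · rw [if_neg (by simpa using hc)]
      simpa [pvFirstIdx] using (PySem.Dict.get?_eq_none_iff_contains d c).mpr (by simpa using hc)
  | succ m ih =>
    intro k d hm
    by_cases hk : l.length ≤ k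
    · rw [PySem.List.pyRange_one_eq_nil (by exact_mod_cast hk), List.foldl_nil,
          List.drop_of_length_le hk]
      by_cases hc : d.contains c
      · rw [if_pos hc]
      · rw [if_neg (by simpa using hc)]
        simpa [pvFirstIdx] using (PySem.Dict.get?_eq_none_iff_contains d c).mpr (by simpa using hc)
    · have hklt : k < l.length := by omega
      rw [PySem.List.pyRange_one_cons (by exact_mod_cast hklt), List.foldl_cons]
      have hget : PySem.List.pyGet? l (k : Int) = some l[k] := by
        rw [PySem.List.pyGet?_natCast]; exact List.getElem?_eq_getElem hklt
      simp only [hget]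
      have hdrop : l.drop k = l[k] :: l.drop (k+1) := (List.getElem_cons_drop hklt).symm
      have hcast : ((k : Int) + 1) = ((k + 1 : Nat) : Int) := by push_cast; ring
      by_cases hxc : l[k] = c
      · subst hxc
        by_cases hc : d.contains l[k]
        · rw [if_pos hc, hcast, ih (k+1) d (by omega), if_pos hc, if_pos hc]
        · rw [if_neg hc, hcast, ih (k+1) (d.insert l[k] (k : Int)) (by omega)]
          rw [if_pos (PySem.Dict.contains_insert_self d l[k] (k:Int)),
              PySem.Dict.get?_insert_self, if_neg hc, hdrop]
          simp [pvFirstIdx]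
      · have hne : c ≠ l[k] := fun h => hxc h.symm
        have hstep : (if d.contains l[k] then d else d.insert l[k] (k : Int)).get? c = d.get? c := by
          split
          · rfl
          · exact PySem.Dict.get?_insert_of_ne _ _ hne
        have hcontains : (if d.contains l[k] then d else d.insert l[k] (k : Int)).contains c = d.contains c := by
          split
          · rfl
          · rw [PySem.Dict.contains_insert]
            simp [hne]
        rw [hcast, ih (k+1) _ (by omega), hstep, hcontains, hdrop]
        by_cases hc : d.contains c
        · rw [if_pos hc, if_pos hc]
        · rw [if_neg hc, if_neg hc]
          simp only [pvFirstIdx, if_neg hxc]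
          cases pvFirstIdx c (l.drop (k+1)) with
          | none => rfl
          | some j =>
            simp only [Option.map_some]
            congr 1
            push_cast; ring_nf

/-- The two accumulation loops, run in lock-step. -/
theorem pv_foldpair (n : Nat) (fA : Char → Int) (gB : Char → Option Int)
    (hFG : ∀ ch, fA ch = (gB ch).getD (-1))
    (hB : ∀ ch p, gB ch = some p → 0 ≤ p ∧ p < (n : Int)) :
    ∀ (L : List Char) (pA pB : Int),
    pA = (if pB = -1 then (n : Int) else pB) →
    (pB = -1 ∨ (0 ≤ pB ∧ pB < (n : Int))) →
    (L.foldl (fun position char =>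
        let posChar := fA char
        if posChar < position ∧ posChar ≥ 0 then fA char else position) pA)
      = (if (L.foldl (fun best ch => match gB ch with
            | some p => if best = -1 ∨ p < best then p else best
            | none => best) pB) = -1 then (n : Int)
         else (L.foldl (fun best ch => match gB ch with
            | some p => if best = -1 ∨ p < best then p else best
            | none => best) pB))
    ∧ ((L.foldl (fun best ch => match gB ch with
            | some p => if best = -1 ∨ p < best then p else best
            | none => best) pB) = -1
       ∨ (0 ≤ (L.foldl (fun best ch => match gB ch with
            | some p => if best = -1 ∨ p < best then p else best
            | none => best) pB)
          ∧ (L.foldl (fun best ch => match gB ch with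
            | some p => if best = -1 ∨ p < best then p else best
            | none => best) pB) < (n : Int))) := by
  intro L
  induction L with
  | nil => intro pA pB h1 h2; exact ⟨h1, h2⟩
  | cons ch L ih =>
    intro pA pB h1 h2
    rw [List.foldl_cons, List.foldl_cons]
    cases hg : gB ch with
    | none =>
      have hf : fA ch = -1 := by rw [hFG ch, hg]; rfl
      have hcond : ¬ (fA ch < pA ∧ fA ch ≥ 0) := by rw [hf]; omega
      simp only [hf]
      rw [if_neg (by omega : ¬ ((-1 : Int) < pA ∧ (-1:Int) ≥ 0))]
      exact ih pA pB h1 h2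
    | some p =>
      have hf : fA ch = p := by rw [hFG ch, hg]; rfl
      obtain ⟨hp0, hpn⟩ := hB ch p hg
      simp only [hf]
      rcases h2 with hB1 | ⟨hB0, hBn⟩
      · subst hB1
        rw [h1, if_pos rfl, if_pos (Or.inl rfl), if_pos (by constructor <;> omega)]
        exact ih p p (by rw [if_neg (by omega)]) (Or.inr ⟨hp0, hpn⟩)
      · have hne : ¬ pB = -1 := by omega
        rw [h1, if_neg hne]
        by_cases hlt : p < pB
        · rw [if_pos (by omega : p < pB ∧ p ≥ 0), if_pos (Or.inr hlt)]
          exact ih p p (by rw [if_neg (by omega)]) (Or.inr ⟨hp0, hpn⟩)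
        · rw [if_neg (by omega : ¬ (p < pB ∧ p ≥ 0)), if_neg (not_or.mpr ⟨hne, hlt⟩)]
          exact ih pB pB (by rw [if_neg hne]) (Or.inr ⟨hB0, hBn⟩)

-- ===== VERDICT (by name: the statement is the Claim_ definition above) =====
theorem getCharPosition_spec : Claim_equal_getCharPosition := by
  intro code strList startPosition _
  unfold Spec_getCharPosition getCharPosition getCharPosition_alt
  show (if (strList.toList.foldl (fun position char =>
        let posChar := PySem.Str.findFrom code (String.ofList [char]) startPosition none
        if posChar < position ∧ posChar ≥ 0 then
          PySem.Str.findFrom code (String.ofList [char]) startPosition none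
        else position) (PySem.Str.len code)) = PySem.Str.len code then -1
      else (strList.toList.foldl (fun position char =>
        let posChar := PySem.Str.findFrom code (String.ofList [char]) startPosition none
        if posChar < position ∧ posChar ≥ 0 then
          PySem.Str.findFrom code (String.ofList [char]) startPosition none
        else position) (PySem.Str.len code)))
    = strList.toList.foldl (fun best ch =>
        match ((PySem.List.pyRange
            (if (if startPosition ≥ 0 then startPosition else PySem.Str.len code + startPosition) < 0 then 0
             else (if startPosition ≥ 0 then startPosition else PySem.Str.len code + startPosition))
            (PySem.Str.len code)).foldl
          (fun d i => match PySem.List.pyGet? code.toList i with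
            | some c => if d.contains c then d else d.insert c i
            | none => d) PySem.Dict.empty).get? ch with
        | some p => if best = -1 ∨ p < best then p else best
        | none => best) (-1)
  have hlen : PySem.Str.len code = (code.toList.length : Int) := by
    simp [PySem.Str.len]
  rw [hlen]
  set l := code.toList with hl
  set n := l.length with hn
  set k := pvClamp startPosition n with hkdef
  have hkle : k ≤ n := by
    rw [hkdef]; unfold pvClamp; split
    · omega
    · exact Nat.min_le_right _ _
  -- B's start value generates the same range as the clamped start
  have hrange : PySem.List.pyRange
        (if (if startPosition ≥ 0 then startPosition else (n : Int) + startPosition) < 0 then 0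
         else (if startPosition ≥ 0 then startPosition else (n : Int) + startPosition))
        ((n : Int))
      = PySem.List.pyRange (k : Int) (n : Int) := by
    by_cases hs : startPosition ≥ 0
    · rw [if_pos hs]
      by_cases hbig : (n : Int) < startPosition
      · rw [if_neg (by omega)]
        have hkn : k = n := by
          rw [hkdef]; unfold pvClamp; rw [if_neg (by omega)]; omega
        rw [PySem.List.pyRange_one_eq_nil (by omega),
            PySem.List.pyRange_one_eq_nil (by rw [hkn])]
      · rw [if_neg (by omega)]
        have : (k : Int) = startPosition := by
          rw [hkdef]; unfold pvClamp; rw [if_neg (by omega)]; omega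
        rw [this]
    · rw [if_neg hs]
      have : (if (n : Int) + startPosition < 0 then 0 else (n:Int) + startPosition) = (k : Int) := by
        rw [hkdef]
        unfold pvClamp
        rw [if_pos (show startPosition < 0 by omega)]
        split <;> omega
      rw [this]
  rw [hrange]
  -- the dict lookups, characterised
  have hdict : ∀ ch, ((PySem.List.pyRange (k : Int) (n : Int)).foldl
      (fun d i => match PySem.List.pyGet? l i with
        | some c => if d.contains c then d else d.insert c i
        | none => d) PySem.Dict.empty).get? ch
      = (pvFirstIdx ch (l.drop k)).map (fun j => ((k + j : Nat) : Int)) := by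
    intro ch
    rw [hn, pv_build_get l ch l.length k PySem.Dict.empty (by omega)]
    rw [if_neg (by simp [PySem.Dict.contains_empty])]
  -- A's finds agree with the dict lookups
  have hFG : ∀ ch, (fun ch => PySem.Str.findFrom code (String.ofList [ch]) startPosition none) ch
      = ((fun ch => (pvFirstIdx ch (l.drop k)).map (fun j => ((k + j : Nat) : Int))) ch).getD (-1) := by
    intro ch
    show PySem.Str.findFrom code (String.ofList [ch]) startPosition none
      = ((pvFirstIdx ch (l.drop k)).map (fun j => ((k + j : Nat) : Int))).getD (-1)
    have hmk : (String.ofList [ch]).toList = [ch] := String.toList_ofList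
    rw [PySem.Str.findFrom_eq, hmk, ← hl,
        pv_findFrom_single l ch startPosition, ← hn, ← hkdef]
    cases pvFirstIdx ch (l.drop k) <;> rfl
  have hB : ∀ ch p, (fun ch => (pvFirstIdx ch (l.drop k)).map (fun j => ((k + j : Nat) : Int))) ch = some p →
      0 ≤ p ∧ p < (n : Int) := by
    intro ch p hsome
    obtain ⟨j, hj, rfl⟩ := Option.map_eq_some_iff.mp hsome
    have hjlt := pvFirstIdx_lt_length hj
    rw [List.length_drop] at hjlt
    constructor
    · positivity
    · exact_mod_cast (by omega : k + j < n)
  obtain ⟨hEq, hInv⟩ := pv_foldpair n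
      (fun ch => PySem.Str.findFrom code (String.ofList [ch]) startPosition none)
      (fun ch => (pvFirstIdx ch (l.drop k)).map (fun j => ((k + j : Nat) : Int)))
      hFG hB strList.toList ((n : Int)) (-1) (by rw [if_pos rfl]) (Or.inl rfl)
  simp only [hdict]
  simp only [] at hEq hInv
  rw [hEq]
  rcases hInv with h1 | ⟨h2, h3⟩
  · rw [if_pos h1, if_pos rfl, h1]
  · rw [if_neg (by omega), if_neg (by omega)]
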